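-- pv_equiv track=rewrite | github.com/JH4789/GTP | EditedGTP.py | count_open_parentheses
-- ===== SOURCE A (Python) =====
-- def count_open_parentheses(master_url, text, ind):
--     """counts how many levels of parentheses are open leading up to this
--     index in the text"""
--     n_open = 0
--     for i, char in enumerate(text[:ind+1]):
--         if char == '(':
--             n_open += 1
--         if char == ')':
--             n_open -= 1
--     return n_open
-- ===== SOURCE B (Python) =====
-- def count_open_parentheses(master_url, text, ind):
--     """counts how many levels of parentheses are open leading up to this
--     index in the text"""
--     def go(s):
--         # divide and conquer: the net open-count is additive over concatenation
--         if len(s) <= 1: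
--             return 1 if s == '(' else (-1 if s == ')' else 0)
--         m = len(s) // 2
--         return go(s[:m]) + go(s[m:])
--     return go(text[:ind+1])
-- ===== Notes on version B (the rewrite author's own statement) =====
-- stated objective: alternative
-- what changed: Replaces A's single left-to-right accumulator loop by a balanced divide-and-conquer recursion that splits the prefix in half and adds the two sub-results, relying on additivity of the net paren count over concatenation.
import Mathlib
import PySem

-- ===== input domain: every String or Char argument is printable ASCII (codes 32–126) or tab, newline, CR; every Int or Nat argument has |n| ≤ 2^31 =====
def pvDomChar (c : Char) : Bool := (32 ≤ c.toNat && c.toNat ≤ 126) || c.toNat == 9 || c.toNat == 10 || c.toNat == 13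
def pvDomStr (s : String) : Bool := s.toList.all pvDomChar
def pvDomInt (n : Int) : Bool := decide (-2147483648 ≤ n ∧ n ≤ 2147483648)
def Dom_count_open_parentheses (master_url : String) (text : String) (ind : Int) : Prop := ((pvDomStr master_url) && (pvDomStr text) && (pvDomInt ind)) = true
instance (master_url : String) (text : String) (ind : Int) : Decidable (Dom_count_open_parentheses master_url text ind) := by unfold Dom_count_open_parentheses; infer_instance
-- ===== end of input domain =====

-- B replaces A's single accumulator loop by a balanced divide-and-conquer recursion (alternative decomposition).

-- ===== PORT A =====
-- n_open starts at 0; for each char of text[:ind+1], two independent ifs adjust it.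
def count_open_parentheses (master_url : String) (text : String) (ind : Int) : Int :=
  (PySem.Str.slice text none (some (ind + 1))).toList.foldl
    (fun n_open char =>
      let n1 := if char == '(' then n_open + 1 else n_open
      if char == ')' then n1 - 1 else n1) 0

-- ===== PORT B =====
-- go(s): if len(s) <= 1 return ±1/0 for the single char; else split at m = len(s)//2
-- and add go(s[:m]) + go(s[m:]).  The in-range slices s[:m] / s[m:] are take/drop
-- (exact: PySem.List.slice_to_natCast / slice_from_natCast).
def goAlt (l : List Char) : Int :=
  if h : l.length ≤ 1 then
    match l with
    | [] => 0
    | c :: _ => if c == '(' then 1 else if c == ')' then -1 else 0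
  else
    goAlt (l.take (l.length / 2)) + goAlt (l.drop (l.length / 2))
termination_by l.length
decreasing_by
  · simp only [List.length_take]; omega
  · simp only [List.length_drop]; omega

def count_open_parentheses_alt (master_url : String) (text : String) (ind : Int) : Int :=
  goAlt (PySem.Str.slice text none (some (ind + 1))).toList

-- ===== PRECONDITION & SPEC =====
def Spec_count_open_parentheses (master_url : String) (text : String) (ind : Int) (out : Int) : Prop := out = count_open_parentheses_alt master_url text ind
instance (master_url : String) (text : String) (ind : Int) (out : Int) : Decidable (Spec_count_open_parentheses master_url text ind out) := by unfold Spec_count_open_parentheses; infer_instance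

-- ===== CLAIM =====
def Claim_equal_count_open_parentheses : Prop := ∀ (master_url : String) (text : String) (ind : Int), Dom_count_open_parentheses master_url text ind → Spec_count_open_parentheses master_url text ind (count_open_parentheses master_url text ind)

-- ===== LEMMAS AND PROOFS =====

-- B's divide-and-conquer computes the difference of the two character counts.
theorem goAlt_eq (l : List Char) : goAlt l = (l.count '(' : Int) - (l.count ')' : Int) := by
  fun_induction goAlt l with
  | case1 => simp
  | case2 c t h1 hc h2 =>
    obtain rfl : t = [] := by simp only [List.length_cons] at h1; exact List.length_eq_zero_iff.mp (by omega)
    simp only [beq_iff_eq] at hc; subst hc; decide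
  | case3 c t h1 hc1 hc2 h2 =>
    obtain rfl : t = [] := by simp only [List.length_cons] at h1; exact List.length_eq_zero_iff.mp (by omega)
    simp only [beq_iff_eq] at hc2; subst hc2; decide
  | case4 c t h1 hc1 hc2 h2 =>
    obtain rfl : t = [] := by simp only [List.length_cons] at h1; exact List.length_eq_zero_iff.mp (by omega)
    simp only [beq_iff_eq] at hc1 hc2
    simp [hc1, hc2]
  | case5 x h ih1 ih2 =>
    rw [ih1, ih2]
    conv_rhs => rw [← List.take_append_drop (x.length / 2) x]
    rw [List.count_append, List.count_append]
    push_cast; ring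

-- A's loop computes the difference of the two character counts.
theorem pv_fold_par (l : List Char) (a : Int) :
    l.foldl (fun n_open char =>
      let n1 := if char == '(' then n_open + 1 else n_open
      if char == ')' then n1 - 1 else n1) a
      = a + (l.count '(' : Int) - (l.count ')' : Int) := by
  induction l generalizing a with
  | nil => simp
  | cons x xs ih =>
    simp only [List.foldl_cons, List.count_cons, ih]
    by_cases h1 : x = '(' <;> by_cases h2 : x = ')' <;>
      simp [h1, h2] <;> omega

-- ===== VERDICT =====
theorem count_open_parentheses_spec : Claim_equal_count_open_parentheses := by
  intro master_url text ind _
  unfold Spec_count_open_parentheses count_open_parentheses count_open_parentheses_alt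
  rw [pv_fold_par, goAlt_eq]
  ring
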